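-- pv_equiv track=rewrite | github.com/phalves/SequenceAlignment | edit_distance.py | linear_sequence_alignment
-- ===== SOURCE A (Python) =====
-- from copy import deepcopy
--
-- def linear_sequence_alignment(x, y, g, a):
--     """ Determines optimal sequence alignment for two strings (x and y) with\
--         linear space.
--             Args:
--                 x   - First string
--                 y   - Second string
--                 g   - Gap penalty
--                 a   - Mismatch penalty
--     """
--     _x = "*%s" % x
--     _y = "*%s" % y
--     m = len(_x)  # Number of characters in x
--     n = len(_y)  # Number of characters in y
--     CURRENT = [i * g for i in range(m)]
--
--     for j in range(1, n):
--         LAST = deepcopy(CURRENT)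
--         CURRENT[0] = j * g
--         for i in range(1, m):
--             _a = 0 if (_x[i] == _y[j]) else a
--             CURRENT[i] = min(_a + LAST[i - 1], g + LAST[i], g + CURRENT[i - 1])
--     return CURRENT, CURRENT[m - 1]
-- ===== SOURCE B (Python) =====
-- def linear_sequence_alignment(x, y, g, a):
--     """Same alignment recurrence, but swept row by row (over x) instead of
--     column by column (over y), harvesting the last entry of each row to
--     assemble the final column; no in-place updates, no deepcopy."""
--     _x = "*%s" % x
--     _y = "*%s" % y
--     m = len(_x)
--     n = len(_y)
--     row = [j * g for j in range(n)]          # row i = 0: costs cost(0, j)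
--     col = [row[n - 1]]                       # cost(0, n-1)
--     for i in range(1, m):
--         new = [i * g]                        # cost(i, 0)
--         for j in range(1, n):
--             _a = 0 if (_x[i] == _y[j]) else a
--             new.append(min(_a + row[j - 1], g + row[j], g + new[j - 1]))
--         row = new
--         col.append(row[n - 1])               # cost(i, n-1)
--     return col, col[m - 1]
-- ===== Notes on version B (the rewrite author's own statement) =====
-- stated objective: alternative
-- what changed: Replaces the column-by-column sweep (rolling CURRENT/deepcopied LAST columns indexed by x, updated in place) with a transposed row-by-row sweep over x that builds each fresh row by appending and harvests the last entry of every row, assembling the returned final column incrementally instead of ever holding it as the working vector.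
import Mathlib
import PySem

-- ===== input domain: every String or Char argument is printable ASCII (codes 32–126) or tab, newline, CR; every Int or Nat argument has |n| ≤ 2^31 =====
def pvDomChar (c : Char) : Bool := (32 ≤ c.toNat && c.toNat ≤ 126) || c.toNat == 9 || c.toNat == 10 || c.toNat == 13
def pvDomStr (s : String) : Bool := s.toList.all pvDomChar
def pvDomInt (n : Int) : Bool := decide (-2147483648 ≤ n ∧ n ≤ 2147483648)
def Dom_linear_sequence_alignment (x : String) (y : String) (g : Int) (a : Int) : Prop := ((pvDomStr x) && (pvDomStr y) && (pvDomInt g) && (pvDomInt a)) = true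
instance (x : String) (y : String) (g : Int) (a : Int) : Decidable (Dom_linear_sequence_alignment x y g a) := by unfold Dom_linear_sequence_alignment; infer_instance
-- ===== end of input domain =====

-- B replaces A's column-by-column sweep (in-place updates, deepcopied previous column)
-- with a transposed row-by-row sweep that harvests the last entry of each row; same
-- cost, different traversal/decomposition (objective: alternative).

-- ===== PORT A =====
def linear_sequence_alignment (x : String) (y : String) (g : Int) (a : Int) : List Int × Int :=
  let xs := '*' :: x.toList
  let ys := '*' :: y.toList
  let m := xs.length
  let n := ys.length
  let CURRENT0 := (List.range m).map (fun (i : Nat) => (i : Int) * g)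
  let CURRENT := (List.range' 1 (n - 1)).foldl (fun CURRENT j =>
      let LAST := CURRENT
      let CURRENT := CURRENT.set 0 ((j : Int) * g)
      (List.range' 1 (m - 1)).foldl (fun CURRENT i =>
          let _a : Int := if xs.getD i ' ' == ys.getD j ' ' then 0 else a
          CURRENT.set i (min (min (_a + LAST.getD (i - 1) 0) (g + LAST.getD i 0))
                             (g + CURRENT.getD (i - 1) 0)))
        CURRENT)
    CURRENT0
  (CURRENT, CURRENT.getD (m - 1) 0)

-- ===== PORT B =====
def linear_sequence_alignment_alt (x : String) (y : String) (g : Int) (a : Int) : List Int × Int :=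
  let xs := '*' :: x.toList
  let ys := '*' :: y.toList
  let m := xs.length
  let n := ys.length
  let row0 := (List.range n).map (fun (j : Nat) => (j : Int) * g)
  let st := (List.range' 1 (m - 1)).foldl (fun (st : List Int × List Int) i =>
      let row := st.1
      let col := st.2
      let new := (List.range' 1 (n - 1)).foldl (fun new j =>
          let _a : Int := if xs.getD i ' ' == ys.getD j ' ' then 0 else a
          new ++ [min (min (_a + row.getD (j - 1) 0) (g + row.getD j 0))
                      (g + new.getD (j - 1) 0)])
        [(i : Int) * g]
      (new, col ++ [new.getD (n - 1) 0]))
    (row0, [row0.getD (n - 1) 0])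
  (st.2, st.2.getD (m - 1) 0)

-- ===== PRECONDITION & SPEC =====
def Spec_linear_sequence_alignment (x : String) (y : String) (g : Int) (a : Int) (out : List Int × Int) : Prop := out = linear_sequence_alignment_alt x y g a
instance (x : String) (y : String) (g : Int) (a : Int) (out : List Int × Int) : Decidable (Spec_linear_sequence_alignment x y g a out) := by unfold Spec_linear_sequence_alignment; infer_instance

-- ===== CLAIM (what is proved, stated in full; the proofs are below) =====
def Claim_equal_linear_sequence_alignment : Prop := ∀ (x : String) (y : String) (g : Int) (a : Int), Dom_linear_sequence_alignment x y g a → Spec_linear_sequence_alignment x y g a (linear_sequence_alignment x y g a)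

-- ===== LEMMAS AND PROOFS =====

/-- The alignment-cost recurrence both ports compute (A's min association). -/
def pvC (xs ys : List Char) (g a : Int) : Nat → Nat → Int
  | 0, j => (j : Int) * g
  | (i+1), 0 => ((i + 1 : Nat) : Int) * g
  | (i+1), (j+1) =>
      let _a : Int := if xs.getD (i+1) ' ' == ys.getD (j+1) ' ' then 0 else a
      min (min (_a + pvC xs ys g a i j) (g + pvC xs ys g a (i+1) j))
          (g + pvC xs ys g a i (j+1))
termination_by i j => (i, j)

theorem pvC_zero_right (xs ys : List Char) (g a : Int) (i : Nat) :
    pvC xs ys g a i 0 = (i : Int) * g := by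
  cases i <;> simp [pvC]

/-- Column j of the cost table, length m. -/
def pvColA (xs ys : List Char) (g a : Int) (m j : Nat) : List Int :=
  (List.range m).map (fun k => pvC xs ys g a k j)

/-- A's working vector mid inner loop: entries ≤ i already at column j, the rest at j-1. -/
def pvMix (xs ys : List Char) (g a : Int) (m j i : Nat) : List Int :=
  (List.range m).map (fun k => if k ≤ i then pvC xs ys g a k j else pvC xs ys g a k (j-1))

/-- Row i of the cost table, length n. -/
def pvRowB (xs ys : List Char) (g a : Int) (n i : Nat) : List Int :=
  (List.range n).map (fun j => pvC xs ys g a i j)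

theorem getD_map_range' (f : Nat → Int) (m k : Nat) (h : k < m) :
    ((List.range m).map f).getD k 0 = f k := by
  simp [List.getD, h]

theorem pvMix_set (xs ys : List Char) (g a : Int) (m j' i' : Nat) (_hi : i' + 1 < m) :
    (pvMix xs ys g a m (j'+1) i').set (i'+1) (pvC xs ys g a (i'+1) (j'+1))
      = pvMix xs ys g a m (j'+1) (i'+1) := by
  apply List.ext_getElem
  · simp [pvMix]
  · intro k h1 h2
    simp only [pvMix, List.length_map, List.length_range] at h1 h2 ⊢
    rw [List.getElem_set]
    simp only [List.getElem_map, List.getElem_range]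
    by_cases hk : i' + 1 = k
    · subst hk; simp
    · simp only [if_neg hk]
      by_cases hk1 : k ≤ i'
      · rw [if_pos hk1, if_pos (by omega)]
      · rw [if_neg hk1, if_neg (by omega)]

theorem pvA_step (xs ys : List Char) (g a : Int) (m j' i' : Nat) (hi : i' + 1 < m) :
    (pvMix xs ys g a m (j'+1) i').set (i'+1)
      (min (min ((if xs.getD (i'+1) ' ' == ys.getD (j'+1) ' ' then (0:Int) else a)
                  + (pvColA xs ys g a m j').getD (i'+1-1) 0)
                (g + (pvColA xs ys g a m j').getD (i'+1) 0))
           (g + (pvMix xs ys g a m (j'+1) i').getD (i'+1-1) 0))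
      = pvMix xs ys g a m (j'+1) (i'+1) := by
  have h1 : (pvColA xs ys g a m j').getD (i'+1-1) 0 = pvC xs ys g a i' j' :=
    getD_map_range' _ m i' (by omega)
  have h2 : (pvColA xs ys g a m j').getD (i'+1) 0 = pvC xs ys g a (i'+1) j' :=
    getD_map_range' _ m (i'+1) hi
  have h3 : (pvMix xs ys g a m (j'+1) i').getD (i'+1-1) 0 = pvC xs ys g a i' (j'+1) := by
    have := getD_map_range'
      (fun k => if k ≤ i' then pvC xs ys g a k (j'+1) else pvC xs ys g a k (j'+1-1)) m i' (by omega)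
    simpa [pvMix] using this
  rw [h1, h2, h3]
  have hv : min (min ((if xs.getD (i'+1) ' ' == ys.getD (j'+1) ' ' then (0:Int) else a)
                    + pvC xs ys g a i' j') (g + pvC xs ys g a (i'+1) j'))
              (g + pvC xs ys g a i' (j'+1)) = pvC xs ys g a (i'+1) (j'+1) := by
    rw [pvC]
  rw [hv]
  exact pvMix_set xs ys g a m j' i' hi

theorem pvA_inner (xs ys : List Char) (g a : Int) (m j' : Nat) :
    ∀ t s, 1 ≤ s → s + t ≤ m →
      (List.range' s t).foldl (fun CURRENT i =>
          CURRENT.set i (min (min ((if xs.getD i ' ' == ys.getD (j'+1) ' ' then (0:Int) else a)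
                                    + (pvColA xs ys g a m j').getD (i - 1) 0)
                                  (g + (pvColA xs ys g a m j').getD i 0))
                             (g + CURRENT.getD (i - 1) 0)))
        (pvMix xs ys g a m (j'+1) (s-1))
      = pvMix xs ys g a m (j'+1) (s-1+t) := by
  intro t
  induction t with
  | zero => intro s _ _; simp
  | succ t ih =>
    intro s hs hst
    rw [List.range'_succ, List.foldl_cons]
    obtain ⟨s', rfl⟩ : ∃ s', s = s' + 1 := ⟨s - 1, by omega⟩
    have hstep := pvA_step xs ys g a m j' s' (by omega)
    simp only [Nat.add_sub_cancel] at hstep ⊢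
    rw [hstep]
    have hih := ih (s' + 1 + 1) (by omega) (by omega)
    simp only [Nat.add_sub_cancel] at hih
    rw [hih]
    congr 1
    omega

theorem pvMix_last (xs ys : List Char) (g a : Int) (m j : Nat) (_hm : 1 ≤ m) :
    pvMix xs ys g a m j (m-1) = pvColA xs ys g a m j := by
  apply List.map_congr_left
  intro k hk
  simp only [List.mem_range] at hk
  rw [if_pos (by omega)]

theorem pvA_start (xs ys : List Char) (g a : Int) (m j' : Nat) (_hm : 1 ≤ m) :
    (pvColA xs ys g a m j').set 0 (((j'+1 : Nat) : Int) * g)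
      = pvMix xs ys g a m (j'+1) 0 := by
  apply List.ext_getElem
  · simp [pvColA, pvMix]
  · intro k h1 h2
    simp only [pvColA, pvMix, List.length_map, List.length_range] at h1 h2 ⊢
    rw [List.getElem_set]
    simp only [List.getElem_map, List.getElem_range]
    by_cases hk : 0 = k
    · subst hk; simp [pvC]
    · rw [if_neg hk, if_neg (by omega)]
      simp

theorem pvA_outer (xs ys : List Char) (g a : Int) (m : Nat) (hm : 1 ≤ m) :
    ∀ t s, 1 ≤ s →
      (List.range' s t).foldl (fun CURRENT j =>
          (List.range' 1 (m - 1)).foldl (fun CUR i =>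
              CUR.set i (min (min ((if xs.getD i ' ' == ys.getD j ' ' then (0:Int) else a)
                                    + CURRENT.getD (i - 1) 0)
                                  (g + CURRENT.getD i 0))
                             (g + CUR.getD (i - 1) 0)))
            (CURRENT.set 0 ((j : Int) * g)))
        (pvColA xs ys g a m (s-1))
      = pvColA xs ys g a m (s-1+t) := by
  intro t
  induction t with
  | zero => intro s _; simp
  | succ t ih =>
    intro s hs
    rw [List.range'_succ, List.foldl_cons]
    obtain ⟨j', rfl⟩ : ∃ j', s = j' + 1 := ⟨s - 1, by omega⟩
    simp only [Nat.add_sub_cancel]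
    rw [pvA_start xs ys g a m j' hm]
    have hin := pvA_inner xs ys g a m j' (m-1) 1 (by omega) (by omega)
    simp only [Nat.sub_self, Nat.zero_add] at hin
    rw [hin, pvMix_last xs ys g a m (j'+1) hm]
    have := ih (j' + 1 + 1) (by omega)
    simp only [Nat.add_sub_cancel] at this
    rw [this]
    congr 1
    omega

theorem pvB_inner (xs ys : List Char) (g a : Int) (n i' : Nat) :
    ∀ t s, 1 ≤ s → s + t ≤ n →
      (List.range' s t).foldl (fun new j =>
          new ++ [min (min ((if xs.getD (i'+1) ' ' == ys.getD j ' ' then (0:Int) else a)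
                             + (pvRowB xs ys g a n i').getD (j - 1) 0)
                           (g + (pvRowB xs ys g a n i').getD j 0))
                      (g + new.getD (j - 1) 0)])
        ((List.range s).map (fun j => pvC xs ys g a (i'+1) j))
      = (List.range (s+t)).map (fun j => pvC xs ys g a (i'+1) j) := by
  intro t
  induction t with
  | zero => intro s _ _; simp
  | succ t ih =>
    intro s hs hst
    rw [List.range'_succ, List.foldl_cons]
    obtain ⟨j', rfl⟩ : ∃ j', s = j' + 1 := ⟨s - 1, by omega⟩
    have h1 : (pvRowB xs ys g a n i').getD (j'+1-1) 0 = pvC xs ys g a i' j' :=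
      getD_map_range' _ n j' (by omega)
    have h2 : (pvRowB xs ys g a n i').getD (j'+1) 0 = pvC xs ys g a i' (j'+1) :=
      getD_map_range' _ n (j'+1) (by omega)
    have h3 : ((List.range (j'+1)).map (fun j => pvC xs ys g a (i'+1) j)).getD (j'+1-1) 0
        = pvC xs ys g a (i'+1) j' :=
      getD_map_range' _ (j'+1) j' (by omega)
    rw [h1, h2, h3]
    have hv : min (min ((if xs.getD (i'+1) ' ' == ys.getD (j'+1) ' ' then (0:Int) else a)
                         + pvC xs ys g a i' j') (g + pvC xs ys g a i' (j'+1)))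
                  (g + pvC xs ys g a (i'+1) j') = pvC xs ys g a (i'+1) (j'+1) := by
      rw [pvC]; rw [min_right_comm]
    rw [hv, show (List.range (j'+1)).map (fun j => pvC xs ys g a (i'+1) j) ++ [pvC xs ys g a (i'+1) (j'+1)]
          = (List.range (j'+1+1)).map (fun j => pvC xs ys g a (i'+1) j) from by
        conv_rhs => rw [List.range_succ]
        simp]
    rw [show j' + 1 + (t + 1) = j' + 1 + 1 + t from by omega]
    exact ih (j' + 1 + 1) (by omega) (by omega)

theorem pvB_outer (xs ys : List Char) (g a : Int) (n : Nat) (hn : 1 ≤ n) :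
    ∀ t s, 1 ≤ s →
      (List.range' s t).foldl (fun (st : List Int × List Int) i =>
          ((List.range' 1 (n - 1)).foldl (fun new j =>
              new ++ [min (min ((if xs.getD i ' ' == ys.getD j ' ' then (0:Int) else a)
                                 + st.1.getD (j - 1) 0)
                               (g + st.1.getD j 0))
                          (g + new.getD (j - 1) 0)])
            [(i : Int) * g],
           st.2 ++ [((List.range' 1 (n - 1)).foldl (fun new j =>
              new ++ [min (min ((if xs.getD i ' ' == ys.getD j ' ' then (0:Int) else a)
                                 + st.1.getD (j - 1) 0)
                               (g + st.1.getD j 0))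
                          (g + new.getD (j - 1) 0)])
            [(i : Int) * g]).getD (n - 1) 0]))
        (pvRowB xs ys g a n (s-1), (List.range s).map (fun k => pvC xs ys g a k (n-1)))
      = (pvRowB xs ys g a n (s-1+t), (List.range (s+t)).map (fun k => pvC xs ys g a k (n-1))) := by
  intro t
  induction t with
  | zero => intro s _; simp
  | succ t ih =>
    intro s hs
    rw [List.range'_succ, List.foldl_cons]
    obtain ⟨i', rfl⟩ : ∃ i', s = i' + 1 := ⟨s - 1, by omega⟩
    simp only [Nat.add_sub_cancel]
    have hstart : [((i'+1 : Nat) : Int) * g]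
        = (List.range 1).map (fun j => pvC xs ys g a (i'+1) j) := by
      simp [List.range_one, pvC]
    have hin := pvB_inner xs ys g a n i' (n-1) 1 (by omega) (by omega)
    rw [show (1:Nat) + (n-1) = n from by omega] at hin
    rw [hstart, hin]
    have hget : ((List.range n).map (fun j => pvC xs ys g a (i'+1) j)).getD (n-1) 0
        = pvC xs ys g a (i'+1) (n-1) := getD_map_range' _ n (n-1) (by omega)
    rw [hget]
    have hcol : (List.range (i'+1)).map (fun k => pvC xs ys g a k (n-1))
          ++ [pvC xs ys g a (i'+1) (n-1)]
        = (List.range (i'+1+1)).map (fun k => pvC xs ys g a k (n-1)) := by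
      conv_rhs => rw [List.range_succ]
      simp
    rw [hcol]
    have := ih (i' + 1 + 1) (by omega)
    simp only [Nat.add_sub_cancel] at this
    rw [show (List.range n).map (fun j => pvC xs ys g a (i'+1) j) = pvRowB xs ys g a n (i'+1) from rfl,
        this]
    rw [show i' + 1 + 1 + t = i' + 1 + (t + 1) from by omega,
        show i' + 1 + t = i' + (t + 1) from by omega]

-- ===== VERDICT =====

theorem linear_sequence_alignment_spec : Claim_equal_linear_sequence_alignment := by
  unfold Claim_equal_linear_sequence_alignment Spec_linear_sequence_alignment
  intro x y g a _
  unfold linear_sequence_alignment linear_sequence_alignment_alt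
  simp only []
  have hm : 1 ≤ ('*' :: x.toList).length := by simp
  have hn : 1 ≤ ('*' :: y.toList).length := by simp
  generalize hX : '*' :: x.toList = xs at *
  generalize hY : '*' :: y.toList = ys at *
  -- A side
  rw [show (List.range xs.length).map (fun (i : Nat) => (i : Int) * g) = pvColA xs ys g a xs.length 0 from
    (List.map_congr_left (fun k _ => by rw [pvC_zero_right])).symm]
  have hA := pvA_outer xs ys g a xs.length hm (ys.length - 1) 1 (by omega)
  simp only [Nat.sub_self, Nat.zero_add] at hA
  rw [hA, show (pvColA xs ys g a xs.length (ys.length - 1)).getD (xs.length - 1) 0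
        = pvC xs ys g a (xs.length - 1) (ys.length - 1) from
      getD_map_range' _ xs.length (xs.length - 1) (by omega)]
  -- B side
  rw [show (List.range ys.length).map (fun (j : Nat) => (j : Int) * g) = pvRowB xs ys g a ys.length 0 from
    (List.map_congr_left (fun k _ => by cases k <;> simp [pvC])).symm]
  rw [show [(pvRowB xs ys g a ys.length 0).getD (ys.length - 1) 0]
        = (List.range 1).map (fun k => pvC xs ys g a k (ys.length - 1)) from by
      rw [show pvRowB xs ys g a ys.length 0
            = (List.range ys.length).map (fun j => pvC xs ys g a 0 j) from rfl,
          getD_map_range' _ ys.length (ys.length - 1) (by omega)]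
      simp [List.range_one]]
  have hB := pvB_outer xs ys g a ys.length hn (xs.length - 1) 1 (by omega)
  simp only [Nat.sub_self, Nat.zero_add] at hB
  rw [show (1:Nat) + (xs.length - 1) = xs.length from by omega] at hB
  rw [hB]
  simp only []
  rw [show ((List.range xs.length).map (fun k => pvC xs ys g a k (ys.length - 1))).getD (xs.length - 1) 0
        = pvC xs ys g a (xs.length - 1) (ys.length - 1) from
      getD_map_range' _ xs.length (xs.length - 1) (by omega)]
  rfl
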